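-- pv_equiv track=rewrite | github.com/Njkzfa/config4 | config_parser.py | _split_dict_pairs
-- ===== SOURCE A (Python) =====
-- from typing import Dict, List, Any, Union, Optional
--
-- def _split_dict_pairs(content: str) -> List[str]:
--     """Разделяет содержимое словаря на пары ключ-значение"""
--     pairs = []
--     current = ""
--     depth = 0  # Глубина вложенных структур
--
--     for char in content:
--         if char == '{':
--             depth += 1
--         elif char == '}':
--             depth -= 1
--         elif char == '(':
--             depth += 1
--         elif char == ')':
--             depth -= 1
--         elif char == ',' and depth == 0:
--             if current.strip():
--                 pairs.append(current.strip())
--             current = ""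
--             continue
--
--         current += char
--
--     if current.strip():
--         pairs.append(current.strip())
--
--     return pairs
-- ===== SOURCE B (Python) =====
-- def _split_dict_pairs(content):
--     pairs = []
--     buf = []
--     depth = 0
--     for frag in content.split(','):
--         depth += frag.count('{') + frag.count('(') - frag.count('}') - frag.count(')')
--         buf.append(frag)
--         if depth == 0:
--             piece = ','.join(buf).strip()
--             if piece:
--                 pairs.append(piece)
--             buf = []
--     if buf:
--         piece = ','.join(buf).strip()
--         if piece:
--             pairs.append(piece)
--     return pairs
-- ===== Notes on version B (the rewrite author's own statement) =====
-- stated objective: faster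
-- what changed: B splits the whole content on the comma separator once with str.split, then reassembles fragments with str.join under a per-fragment brace/paren count balance, instead of A's character-by-character loop that grows the current pair one char at a time.
import Mathlib
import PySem

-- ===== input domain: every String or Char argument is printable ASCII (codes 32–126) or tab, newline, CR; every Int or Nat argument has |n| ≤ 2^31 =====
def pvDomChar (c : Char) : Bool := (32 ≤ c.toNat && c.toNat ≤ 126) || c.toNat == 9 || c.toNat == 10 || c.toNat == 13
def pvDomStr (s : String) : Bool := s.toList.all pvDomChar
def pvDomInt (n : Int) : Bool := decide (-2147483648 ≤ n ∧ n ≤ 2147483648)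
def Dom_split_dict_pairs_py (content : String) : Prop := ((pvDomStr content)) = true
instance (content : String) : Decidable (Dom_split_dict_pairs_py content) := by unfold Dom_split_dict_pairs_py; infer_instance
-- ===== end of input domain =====

-- B splits the whole content on the comma separator once, then reassembles fragments with a
-- per-fragment brace/paren count balance, instead of A's character-by-character loop; the
-- timing run measured B faster (bulk str.split/join/count vs per-char string building).

-- ===== PORT A =====
-- state: (pairs, current, depth), exactly A's three loop variables
def pvStepA (st : List (List Char) × List Char × Int) (c : Char) :
    List (List Char) × List Char × Int :=
  if c = '{' then (st.1, st.2.1 ++ [c], st.2.2 + 1)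
  else if c = '}' then (st.1, st.2.1 ++ [c], st.2.2 - 1)
  else if c = '(' then (st.1, st.2.1 ++ [c], st.2.2 + 1)
  else if c = ')' then (st.1, st.2.1 ++ [c], st.2.2 - 1)
  else if c = ',' ∧ st.2.2 = 0 then
    ((if PySem.Chars.strip st.2.1 ≠ [] then st.1 ++ [PySem.Chars.strip st.2.1] else st.1),
      [], st.2.2)
  else (st.1, st.2.1 ++ [c], st.2.2)

def pvFinishA (st : List (List Char) × List Char × Int) : List (List Char) :=
  if PySem.Chars.strip st.2.1 ≠ [] then st.1 ++ [PySem.Chars.strip st.2.1] else st.1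

def split_dict_pairs_py (content : String) : List String :=
  (pvFinishA (content.toList.foldl pvStepA ([], [], 0))).map (fun cs => String.mk cs)

-- ===== PORT B =====
-- flush: ','.join(buf).strip(), appended if non-empty
def pvFlushB (pairs : List (List Char)) (buf : List (List Char)) : List (List Char) :=
  let piece := PySem.Chars.strip (PySem.Chars.join [','] buf)
  if piece ≠ [] then pairs ++ [piece] else pairs

-- state: (pairs, buf, depth), exactly B's three loop variables
def pvStepB (st : List (List Char) × List (List Char) × Int) (frag : List Char) :
    List (List Char) × List (List Char) × Int :=
  let depth := st.2.2 + (PySem.Chars.count frag ['{'] : Int) + (PySem.Chars.count frag ['('] : Int)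
      - (PySem.Chars.count frag ['}'] : Int) - (PySem.Chars.count frag [')'] : Int)
  let buf := st.2.1 ++ [frag]
  if depth = 0 then (pvFlushB st.1 buf, [], depth) else (st.1, buf, depth)

def pvFinishB (st : List (List Char) × List (List Char) × Int) : List (List Char) :=
  if st.2.1 ≠ [] then pvFlushB st.1 st.2.1 else st.1

def split_dict_pairs_py_alt (content : String) : List String :=
  (pvFinishB ((PySem.Chars.splitOn content.toList [',']).foldl pvStepB ([], [], 0))).map
    (fun cs => String.mk cs)

-- ===== PRECONDITION & SPEC =====
def Spec_split_dict_pairs_py (content : String) (out : List String) : Prop := out = split_dict_pairs_py_alt content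
instance (content : String) (out : List String) : Decidable (Spec_split_dict_pairs_py content out) := by unfold Spec_split_dict_pairs_py; infer_instance

-- ===== CLAIM (what is proved, stated in full; the proofs are below) =====
def Claim_equal_split_dict_pairs_py : Prop := ∀ (content : String), Dom_split_dict_pairs_py content → Spec_split_dict_pairs_py content (split_dict_pairs_py content)

-- ===== LEMMAS AND PROOFS =====

-- recursive reference model of content.split(',')
def pvMySplit : List Char → List (List Char)
  | [] => [[]]
  | c :: rest =>
    if c = ',' then [] :: pvMySplit rest
    else
      match pvMySplit rest with
      | [] => [[c]]
      | h :: t => (c :: h) :: t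

lemma pvMySplit_ne_nil (l : List Char) : pvMySplit l ≠ [] := by
  cases l with
  | nil => simp [pvMySplit]
  | cons c rest =>
    simp only [pvMySplit]
    split_ifs
    · simp
    · rcases h : pvMySplit rest with _ | ⟨h', t⟩ <;> simp

lemma pvMySplit_comma (rest : List Char) : pvMySplit (',' :: rest) = [] :: pvMySplit rest := by
  simp [pvMySplit]

lemma pvMySplit_cons {c : Char} (hc : c ≠ ',') {rest h : List Char} {t : List (List Char)}
    (hms : pvMySplit rest = h :: t) : pvMySplit (c :: rest) = (c :: h) :: t := by
  simp [pvMySplit, hc, hms]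

def pvConsHead (p : List Char) : List (List Char) → List (List Char)
  | [] => []
  | h :: t => (p ++ h) :: t

lemma pv_splitOn_go_eq : ∀ (fuel : Nat) (l cur : List Char) (acc : List (List Char)),
    l.length ≤ fuel →
    PySem.Chars.splitOn.go [','] fuel l cur acc =
      acc.reverse ++ pvConsHead cur.reverse (pvMySplit l) := by
  intro fuel
  induction fuel with
  | zero =>
    intro l cur acc h
    have : l = [] := by cases l <;> simp_all
    subst this
    simp [PySem.Chars.splitOn.go, pvMySplit, pvConsHead]
  | succ n ih =>
    intro l cur acc h
    cases l with
    | nil => simp [PySem.Chars.splitOn.go, pvMySplit, pvConsHead]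
    | cons c rest =>
      by_cases hc : c = ','
      · subst hc
        have hpre : List.isPrefixOf [','] (',' :: rest) = true := by
          simp [List.isPrefixOf]
        simp only [PySem.Chars.splitOn.go, hpre, if_pos]
        rw [show List.drop (List.length [',']) (',' :: rest) = rest by simp]
        rw [ih rest [] (cur.reverse :: acc) (by simpa using Nat.le_of_succ_le_succ h)]
        rcases hms : pvMySplit rest with _ | ⟨h', t⟩
        · exact absurd hms (pvMySplit_ne_nil rest)
        · simp [pvMySplit, hms, pvConsHead]
      · have hpre : List.isPrefixOf [','] (c :: rest) = false := by
          simp [List.isPrefixOf]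
          exact fun hh => hc hh.symm
        simp only [PySem.Chars.splitOn.go, hpre]
        rw [if_neg (by simp)]
        rw [ih rest (c :: cur) acc (by simpa using Nat.le_of_succ_le_succ h)]
        rcases hms : pvMySplit rest with _ | ⟨h', t⟩
        · exact absurd hms (pvMySplit_ne_nil rest)
        · simp [pvMySplit, hc, hms, pvConsHead]

lemma pv_splitOn_eq (s : List Char) :
    PySem.Chars.splitOn s [','] = pvMySplit s := by
  unfold PySem.Chars.splitOn
  rw [pv_splitOn_go_eq (s.length + 1) s [] [] (Nat.le_succ _)]
  rcases hms : pvMySplit s with _ | ⟨h', t⟩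
  · exact absurd hms (pvMySplit_ne_nil s)
  · simp [pvConsHead]

-- join with "," : basic equations
lemma pv_join_singleton (f : List Char) : PySem.Chars.join [','] [f] = f := by
  simp [PySem.Chars.join, List.intercalate]

lemma pv_join_cons_cons (f g : List Char) (t : List (List Char)) :
    PySem.Chars.join [','] (f :: g :: t) = f ++ ',' :: PySem.Chars.join [','] (g :: t) := by
  simp [PySem.Chars.join, List.intercalate, List.intersperse]

lemma pv_join_cons_head (c : Char) (h : List Char) (t : List (List Char)) :
    PySem.Chars.join [','] ((c :: h) :: t) = c :: PySem.Chars.join [','] (h :: t) := by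
  cases t with
  | nil => simp [pv_join_singleton]
  | cons x xs => rw [pv_join_cons_cons, pv_join_cons_cons]; simp

lemma pv_join_mySplit (s : List Char) :
    PySem.Chars.join [','] (pvMySplit s) = s := by
  induction s with
  | nil => simp [pvMySplit]
  | cons c rest ih =>
    rcases hms : pvMySplit rest with _ | ⟨h', t⟩
    · exact absurd hms (pvMySplit_ne_nil rest)
    · rw [hms] at ih
      by_cases hc : c = ','
      · subst hc
        rw [pvMySplit_comma, hms, pv_join_cons_cons, ih]
        simp
      · rw [pvMySplit_cons hc hms, pv_join_cons_head, ih]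

lemma pv_mySplit_no_comma (s : List Char) :
    ∀ f ∈ pvMySplit s, (',' : Char) ∉ f := by
  induction s with
  | nil => intro f hf; simp [pvMySplit] at hf; simp [hf]
  | cons c rest ih =>
    intro f hf
    rcases hms : pvMySplit rest with _ | ⟨h', t⟩
    · exact absurd hms (pvMySplit_ne_nil rest)
    · by_cases hc : c = ','
      · subst hc
        rw [pvMySplit_comma] at hf
        rcases List.mem_cons.mp hf with rfl | hf
        · simp
        · exact ih f hf
      · rw [pvMySplit_cons hc hms] at hf
        rcases List.mem_cons.mp hf with rfl | hf
        · intro hmem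
          rcases List.mem_cons.mp hmem with h1 | h1
          · exact hc h1.symm
          · exact ih h' (hms ▸ List.mem_cons_self) h1
        · exact ih f (hms ▸ List.mem_cons_of_mem _ hf)

-- single-character count
lemma pv_count_go_eq (c : Char) : ∀ (fuel : Nat) (l : List Char) (acc : Nat),
    l.length ≤ fuel →
    PySem.Chars.count.go [c] fuel l acc = acc + l.count c := by
  intro fuel
  induction fuel with
  | zero =>
    intro l acc h
    have : l = [] := by cases l <;> simp_all
    subst this; simp [PySem.Chars.count.go]
  | succ n ih =>
    intro l acc h
    cases l with
    | nil => simp [PySem.Chars.count.go]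
    | cons a t =>
      by_cases hc : c = a
      · subst hc
        have hpre : List.isPrefixOf [c] (c :: t) = true := by simp [List.isPrefixOf]
        simp only [PySem.Chars.count.go, hpre, if_pos]
        rw [show List.drop (List.length [c]) (c :: t) = t by simp]
        rw [ih t (acc + 1) (by simpa using Nat.le_of_succ_le_succ h)]
        simp
        omega
      · have hpre : List.isPrefixOf [c] (a :: t) = false := by
          simp [List.isPrefixOf]; exact fun hh => hc hh
        simp only [PySem.Chars.count.go, hpre]
        rw [if_neg (by simp)]
        rw [ih t acc (by simpa using Nat.le_of_succ_le_succ h)]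
        simp [Ne.symm hc]

lemma pv_count_single (f : List Char) (c : Char) :
    PySem.Chars.count f [c] = f.count c := by
  unfold PySem.Chars.count
  rw [if_neg (by simp)]
  simpa using pv_count_go_eq c f.length f 0 (le_refl _)

-- net depth change of a fragment
def pvNet (f : List Char) : Int :=
  (f.count '{' : Int) + (f.count '(' : Int) - (f.count '}' : Int) - (f.count ')' : Int)

def pvDelta (c : Char) : Int :=
  if c = '{' then 1 else if c = '}' then -1
  else if c = '(' then 1 else if c = ')' then -1 else 0

lemma pvNet_cons (c : Char) (f : List Char) : pvNet (c :: f) = pvDelta c + pvNet f := by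
  unfold pvNet pvDelta
  by_cases h1 : c = '{' <;> by_cases h2 : c = '}' <;> by_cases h3 : c = '(' <;>
    by_cases h4 : c = ')' <;>
    simp_all <;> ring

lemma pvNet_nil : pvNet [] = 0 := by simp [pvNet]

lemma pvStepA_nocomma (c : Char) (hc : c ≠ ',') (pairs : List (List Char)) (cur : List Char)
    (d : Int) : pvStepA (pairs, cur, d) c = (pairs, cur ++ [c], d + pvDelta c) := by
  unfold pvStepA pvDelta
  by_cases h1 : c = '{' <;> by_cases h2 : c = '}' <;> by_cases h3 : c = '(' <;>
    by_cases h4 : c = ')' <;> simp_all <;> ring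

lemma pv_foldl_stepA_nocomma (f : List Char) (hf : (',' : Char) ∉ f) :
    ∀ (pairs : List (List Char)) (cur : List Char) (d : Int),
    f.foldl pvStepA (pairs, cur, d) = (pairs, cur ++ f, d + pvNet f) := by
  induction f with
  | nil => intro pairs cur d; simp [pvNet_nil]
  | cons c t ih =>
    intro pairs cur d
    have hc : c ≠ ',' := fun h => hf (h ▸ List.mem_cons_self)
    have ht : (',' : Char) ∉ t := fun h => hf (List.mem_cons_of_mem _ h)
    simp only [List.foldl_cons, pvStepA_nocomma c hc]
    rw [ih ht]
    simp [pvNet_cons]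
    ring

lemma pvStepB_eval (pairs : List (List Char)) (buf : List (List Char)) (d : Int)
    (frag : List Char) :
    pvStepB (pairs, buf, d) frag =
      if d + pvNet frag = 0 then (pvFlushB pairs (buf ++ [frag]), [], d + pvNet frag)
      else (pairs, buf ++ [frag], d + pvNet frag) := by
  unfold pvStepB pvNet
  simp only [pv_count_single]
  have : d + ((frag.count '{' : Int) + (frag.count '(' : Int)
      - (frag.count '}' : Int) - (frag.count ')' : Int))
      = d + (frag.count '{' : Int) + (frag.count '(' : Int)
      - (frag.count '}' : Int) - (frag.count ')' : Int) := by ring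
  simp only [← this]

-- A's `current` at a fragment boundary, as a function of B's `buf`
def pvCurOf (buf : List (List Char)) : List Char :=
  if buf = [] then [] else PySem.Chars.join [','] buf ++ [',']

lemma pv_join_snoc (b f : List Char) (bs : List (List Char)) :
    PySem.Chars.join [','] ((b :: bs) ++ [f]) =
      PySem.Chars.join [','] (b :: bs) ++ ',' :: f := by
  induction bs generalizing b with
  | nil =>
    rw [List.cons_append, List.nil_append, pv_join_cons_cons, pv_join_singleton,
      pv_join_singleton]
  | cons x xs ih =>
    simp only [List.cons_append] at ih ⊢
    rw [pv_join_cons_cons, ih x, pv_join_cons_cons]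
    simp

lemma pvCurOf_append (buf : List (List Char)) (f : List Char) :
    pvCurOf buf ++ f = PySem.Chars.join [','] (buf ++ [f]) := by
  cases buf with
  | nil =>
    simp only [List.nil_append]
    rw [pv_join_singleton]
    simp [pvCurOf]
  | cons b bs =>
    rw [pv_join_snoc]
    simp [pvCurOf]

lemma pvFinishA_flush (pairs : List (List Char)) (buf : List (List Char)) (d : Int) :
    pvFinishA (pairs, PySem.Chars.join [','] buf, d) = pvFlushB pairs buf := by
  simp [pvFinishA, pvFlushB]

lemma pv_main : ∀ (rest : List (List Char)) (f : List Char) (pairs buf : List (List Char))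
    (d : Int), (∀ g ∈ f :: rest, (',' : Char) ∉ g) → (buf ≠ [] → d ≠ 0) →
    pvFinishA ((PySem.Chars.join [','] (f :: rest)).foldl pvStepA (pairs, pvCurOf buf, d)) =
      pvFinishB ((f :: rest).foldl pvStepB (pairs, buf, d)) := by
  intro rest
  induction rest with
  | nil =>
    intro f pairs buf d hcf _
    have hf : (',' : Char) ∉ f := hcf f List.mem_cons_self
    rw [pv_join_singleton, pv_foldl_stepA_nocomma f hf, pvCurOf_append]
    simp only [List.foldl_cons, List.foldl_nil, pvStepB_eval]
    split_ifs with hd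
    · simp [pvFinishB, pvFinishA_flush]
    · rw [pvFinishA_flush]
      simp [pvFinishB]
  | cons g rs ih =>
    intro f pairs buf d hcf hbd
    have hf : (',' : Char) ∉ f := hcf f List.mem_cons_self
    have hrest : ∀ x ∈ g :: rs, (',' : Char) ∉ x := fun x hx => hcf x (List.mem_cons_of_mem _ hx)
    rw [pv_join_cons_cons]
    rw [List.foldl_append, pv_foldl_stepA_nocomma f hf, pvCurOf_append]
    simp only [List.foldl_cons, pvStepB_eval]
    by_cases hd : d + pvNet f = 0
    · -- comma at depth 0: A flushes, B flushed after the fragment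
      have hstep : pvStepA (pairs, PySem.Chars.join [','] (buf ++ [f]), d + pvNet f) ',' =
          (pvFlushB pairs (buf ++ [f]), [], d + pvNet f) := by
        unfold pvStepA pvFlushB
        simp [hd]
      rw [hstep, if_pos hd, hd]
      have := ih g (pvFlushB pairs (buf ++ [f])) [] 0 hrest (by simp)
      simpa [pvCurOf] using this
    · -- comma at non-zero depth: A keeps the comma in `current`, B keeps buffering
      have hstep : pvStepA (pairs, PySem.Chars.join [','] (buf ++ [f]), d + pvNet f) ',' =
          (pairs, PySem.Chars.join [','] (buf ++ [f]) ++ [','], d + pvNet f) := by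
        unfold pvStepA
        simp [hd]
      rw [hstep, if_neg hd]
      have := ih g pairs (buf ++ [f]) (d + pvNet f) hrest (fun _ => hd)
      simpa [pvCurOf] using this

-- ===== VERDICT (by name: the statement is the Claim_ definition above) =====
theorem split_dict_pairs_py_spec : Claim_equal_split_dict_pairs_py := by
  intro content _
  unfold Spec_split_dict_pairs_py split_dict_pairs_py split_dict_pairs_py_alt
  rw [pv_splitOn_eq]
  rcases hms : pvMySplit content.toList with _ | ⟨f, rest⟩
  · exact absurd hms (pvMySplit_ne_nil _)
  · have hjoin : content.toList = PySem.Chars.join [','] (f :: rest) := by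
      rw [← hms, pv_join_mySplit]
    rw [hjoin]
    have hnc : ∀ g ∈ f :: rest, (',' : Char) ∉ g := by
      intro g hg; exact pv_mySplit_no_comma content.toList g (hms ▸ hg)
    have := pv_main rest f [] [] 0 hnc (by simp)
    rw [show pvCurOf [] = [] from rfl] at this
    rw [this]
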